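-- pv_equiv track=rewrite | github.com/oldcompcz/mzf-viewer | utils.py | zoomed
-- ===== SOURCE A (Python) =====
-- def zoomed(byte, little_endian=True):
--     """Return a list of four values that represent a "bitwise zoom" of 'byte'.
--     """
--
--     double_byte = sum(double_bit
--                       for bit, double_bit in zip((1, 2, 4, 8,
--                                                   16, 32, 64, 128),
--                                                  (3, 12, 48, 192,
--                                                  768, 3072, 12288, 49152))
--                       if byte & bit)
--
--     if little_endian:
--         return [double_byte & 0xff, double_byte >> 8] * 2
--     else:
--         return [double_byte >> 8, double_byte & 0xff] * 2
-- ===== SOURCE B (Python) =====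
-- def zoomed(byte, little_endian=True):
--     """Return a list of four values that represent a "bitwise zoom" of 'byte'.
--     """
--
--     # Branch-free bit spreading: move bit i of the low byte to position 2i,
--     # then duplicate each spread bit into positions 2i and 2i+1.
--     x = byte & 0xFF
--     x = (x | (x << 4)) & 0x0F0F
--     x = (x | (x << 2)) & 0x3333
--     x = (x | (x << 1)) & 0x5555
--     double_byte = x | (x << 1)
--
--     if little_endian:
--         pair = [double_byte & 0xff, double_byte >> 8]
--     else:
--         pair = [double_byte >> 8, double_byte & 0xff]
--     return pair * 2
-- ===== Notes on version B (the rewrite author's own statement) =====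
-- stated objective: alternative
-- what changed: Replaces the sum over a zip of bit/double-bit tables (8 masked tests) by a branch-free bit-spreading cascade: shift-or-mask steps move bit i of the low byte to position 2i, then one final or duplicates it into 2i+1.
import Mathlib
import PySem

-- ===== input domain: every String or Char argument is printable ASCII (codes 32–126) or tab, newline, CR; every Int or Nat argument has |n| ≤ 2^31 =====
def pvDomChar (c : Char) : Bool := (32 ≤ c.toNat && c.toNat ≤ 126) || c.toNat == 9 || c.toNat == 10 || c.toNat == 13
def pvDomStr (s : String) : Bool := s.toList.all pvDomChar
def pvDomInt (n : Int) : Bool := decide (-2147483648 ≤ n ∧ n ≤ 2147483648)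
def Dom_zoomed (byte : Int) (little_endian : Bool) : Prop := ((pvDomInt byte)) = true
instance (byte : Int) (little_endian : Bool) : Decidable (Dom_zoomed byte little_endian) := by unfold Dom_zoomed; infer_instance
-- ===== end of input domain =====

-- B replaces A's sum over a zip of bit/double-bit tables by a branch-free bit-spreading
-- cascade (shift-or-mask) that maps bit i to bits 2i,2i+1; same values, different algorithm.

-- ===== PORT A =====
def zoomed (byte : Int) (little_endian : Bool) : List Int :=
  let double_byte :=
    (List.zip [1, 2, 4, 8, 16, 32, 64, 128]
              [3, 12, 48, 192, 768, 3072, 12288, 49152]).foldl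
      (fun acc p => if PySem.Int.band byte p.1 ≠ 0 then acc + p.2 else acc) (0 : Int)
  if little_endian then
    [PySem.Int.band double_byte 0xff, double_byte >>> 8] ++
      [PySem.Int.band double_byte 0xff, double_byte >>> 8]
  else
    [double_byte >>> 8, PySem.Int.band double_byte 0xff] ++
      [double_byte >>> 8, PySem.Int.band double_byte 0xff]

-- ===== PORT B =====
def zoomed_alt (byte : Int) (little_endian : Bool) : List Int :=
  let x0 := PySem.Int.band byte 0xFF
  let x1 := PySem.Int.band (PySem.Int.bor x0 (x0 <<< 4)) 0x0F0F
  let x2 := PySem.Int.band (PySem.Int.bor x1 (x1 <<< 2)) 0x3333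
  let x3 := PySem.Int.band (PySem.Int.bor x2 (x2 <<< 1)) 0x5555
  let double_byte := PySem.Int.bor x3 (x3 <<< 1)
  let pair :=
    if little_endian then [PySem.Int.band double_byte 0xff, double_byte >>> 8]
    else [double_byte >>> 8, PySem.Int.band double_byte 0xff]
  pair ++ pair

-- ===== PRECONDITION & SPEC =====
def Spec_zoomed (byte : Int) (little_endian : Bool) (out : List Int) : Prop := out = zoomed_alt byte little_endian
instance (byte : Int) (little_endian : Bool) (out : List Int) : Decidable (Spec_zoomed byte little_endian out) := by unfold Spec_zoomed; infer_instance

-- ===== CLAIM (what is proved, stated in full; the proofs are below) =====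
def Claim_equal_zoomed : Prop := ∀ (byte : Int) (little_endian : Bool), Dom_zoomed byte little_endian → Spec_zoomed byte little_endian (zoomed byte little_endian)

-- ===== LEMMAS AND PROOFS =====

-- m &&& b only reads b's low 8 bits when m < 256
lemma nat_and_mod (m b : Nat) (hm : m < 256) : m &&& b = m &&& (b % 256) := by
  apply Nat.eq_of_testBit_eq
  intro i
  simp only [Nat.testBit_and, show (256:Nat) = 2 ^ 8 from rfl, Nat.testBit_mod_two_pow]
  by_cases h : i < 8
  · simp [h]
  · have h8 : (256:Nat) ≤ 2 ^ i := by
      calc (256:Nat) = 2 ^ 8 := by norm_num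
      _ ≤ 2 ^ i := Nat.pow_le_pow_right (by norm_num) (by omega)
    have : m.testBit i = false := Nat.testBit_eq_false_of_lt (by omega)
    simp [this]

-- in 8 bits, AND with the complement is subtraction of the AND
set_option maxRecDepth 16384 in
set_option maxHeartbeats 4000000 in
lemma nat_and_compl : ∀ (m c : Fin 256), m.val - (m.val &&& c.val) = m.val &&& (255 - c.val) := by
  decide

-- a Python '&' with a mask below 256 only reads a's low 8 bits
lemma band_mod (a m : Int) (h0 : 0 ≤ m) (h1 : m < 256) :
    PySem.Int.band a m = PySem.Int.band (a % 256) m := by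
  have hmn : m.toNat < 256 := by omega
  have he0 : (0:Int) ≤ a % 256 := by omega
  by_cases ha : 0 ≤ a
  · simp only [PySem.Int.band, if_pos ha, if_pos h0, if_pos he0]
    have ht : (a % 256).toNat = a.toNat % 256 := by omega
    rw [ht, Nat.and_comm a.toNat, nat_and_mod _ _ hmn, Nat.and_comm]
  · simp only [PySem.Int.band, if_neg ha, if_pos h0, if_pos he0]
    have hb0 : (0:Int) ≤ -a - 1 := by omega
    have ht : (a % 256).toNat = 255 - (-a - 1).toNat % 256 := by omega
    rw [nat_and_mod _ _ hmn, ht]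
    have hc : (-a - 1).toNat % 256 < 256 := Nat.mod_lt _ (by norm_num)
    have := nat_and_compl ⟨m.toNat, hmn⟩ ⟨(-a - 1).toNat % 256, hc⟩
    simp only at this
    rw [this, Nat.and_comm]

lemma zoomed_mod (byte : Int) (le : Bool) : zoomed byte le = zoomed (byte % 256) le := by
  unfold zoomed
  simp only [List.zip, List.zipWith, List.foldl]
  rw [band_mod byte 1 (by norm_num) (by norm_num), band_mod byte 2 (by norm_num) (by norm_num),
      band_mod byte 4 (by norm_num) (by norm_num), band_mod byte 8 (by norm_num) (by norm_num),
      band_mod byte 16 (by norm_num) (by norm_num), band_mod byte 32 (by norm_num) (by norm_num),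
      band_mod byte 64 (by norm_num) (by norm_num), band_mod byte 128 (by norm_num) (by norm_num)]

lemma zoomed_alt_mod (byte : Int) (le : Bool) : zoomed_alt byte le = zoomed_alt (byte % 256) le := by
  unfold zoomed_alt
  rw [band_mod byte 0xFF (by norm_num) (by norm_num)]

set_option maxHeartbeats 2000000 in
set_option maxRecDepth 8192 in
lemma key256 : ∀ (r : Fin 256) (le : Bool), zoomed (r.val : Int) le = zoomed_alt (r.val : Int) le := by
  decide

-- ===== VERDICT (by name: the statement is the Claim_ definition above) =====
theorem zoomed_spec : Claim_equal_zoomed := by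
  intro byte le _
  unfold Spec_zoomed
  rw [zoomed_mod, zoomed_alt_mod]
  have hr : byte % 256 = (((byte % 256).toNat : Nat) : Int) := by omega
  rw [hr]
  exact key256 ⟨(byte % 256).toNat, by omega⟩ le
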